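-- pv_equiv track=rewrite | github.com/puruadhikari/python-help-guide | graph/amex_ancestor.py | find_earliest_ancestor
-- ===== SOURCE A (Python) =====
-- def find_earliest_ancestor(parent_child_paris,target):
--     graph = {}
--
--     for parent, child in parent_child_paris:
--         if child not in graph:
--             graph[child] = [parent]
--         else:
--             graph[child].append(parent)
--     result = dfs(graph,target)
--     if result == target:
--         return -1
--
--     return result
--
-- def dfs(graph1, number):
--     if number not in graph1:
--         return number
--
--     # earliest_ancestor = None
--     for items in graph1[number]:
--         ancestor = dfs(graph1, items)
--
--     # # edge case when two items are found but not sure.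
--     # if earliest_ancestor is None or ancestor < earliest_ancestor:
--     #     earliest_ancestor = ancestor
--
--     return ancestor
-- ===== SOURCE B (Python) =====
-- def find_earliest_ancestor(parent_child_paris, target):
--     parent = {child: p for p, child in parent_child_paris}
--     node = target
--     while node in parent:
--         node = parent[node]
--     return -1 if node == target else node
-- ===== Notes on version B (the rewrite author's own statement) =====
-- stated objective: simpler
-- what changed: B builds a child->parent dict with a comprehension (later pairs overwrite earlier ones) and walks up the chain with a plain while loop, instead of A's child->parents-list dict plus a recursive dfs over every parent branch; Pre_ excludes inputs with a cycle among target's ancestors, on which A raises RecursionError and B loops.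
import Mathlib
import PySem

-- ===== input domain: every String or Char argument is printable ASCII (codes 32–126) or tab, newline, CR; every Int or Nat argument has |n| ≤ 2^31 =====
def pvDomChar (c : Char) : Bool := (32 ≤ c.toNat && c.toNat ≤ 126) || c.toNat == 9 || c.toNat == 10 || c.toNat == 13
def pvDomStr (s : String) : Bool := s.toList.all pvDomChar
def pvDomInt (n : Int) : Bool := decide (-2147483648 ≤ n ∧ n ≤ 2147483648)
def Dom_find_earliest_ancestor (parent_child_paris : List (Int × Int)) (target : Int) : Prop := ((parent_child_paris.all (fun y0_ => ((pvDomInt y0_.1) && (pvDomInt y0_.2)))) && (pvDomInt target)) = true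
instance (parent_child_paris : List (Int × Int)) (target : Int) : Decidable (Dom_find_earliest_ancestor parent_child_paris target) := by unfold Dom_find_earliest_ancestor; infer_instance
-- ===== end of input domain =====

-- B builds a child->parent dict (later pairs overwrite) and walks the chain with a loop
-- instead of A's parents-list dict + recursive dfs; objective: simpler.


-- ===== PORT A =====
-- `if child not in graph: graph[child] = [parent] else: graph[child].append(parent)`
def pvBuildStep (d : PySem.Dict Int (List Int)) (pc : Int × Int) : PySem.Dict Int (List Int) :=
  if d.contains pc.2 = false then d.insert pc.2 [pc.1] else d.modify pc.2 [] (· ++ [pc.1])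

-- the `for items in graph1[number]: ancestor = dfs(graph1, items)` loop; acc = the current value
-- of `ancestor` (none = not yet assigned / an exception propagated; the caller's list is never empty)
def pvLoopA (dfs : Int → Option Int) : List Int → Option Int → Option Int
  | [], acc => acc
  | it :: rest, _acc =>
    match dfs it with
    | none => none
    | some a => pvLoopA dfs rest (some a)

-- dfs with fuel; `none` models Python's unbounded recursion not returning (RecursionError)
def pvDfsA (g : PySem.Dict Int (List Int)) : Nat → Int → Option Int
  | 0, _ => none
  | k+1, n =>
    match g.get? n with
    | none => some n
    | some ps => pvLoopA (pvDfsA g k) ps none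

def find_earliest_ancestor (parent_child_paris : List (Int × Int)) (target : Int) : Int :=
  let graph := parent_child_paris.foldl pvBuildStep PySem.Dict.empty
  match pvDfsA graph (parent_child_paris.length + 1) target with
  | none => 0  -- fuel exhausted: A does not return here (outside Pre_)
  | some result => if result = target then -1 else result

-- ===== PORT B =====
-- the `while node in parent: node = parent[node]` loop with fuel; `none` models
-- non-termination (outside Pre_)
def pvChase (parent : PySem.Dict Int Int) : Nat → Int → Option Int
  | 0, _ => none
  | k+1, n =>
    match parent.get? n with
    | none => some n
    | some p => pvChase parent k p

def find_earliest_ancestor_alt (parent_child_paris : List (Int × Int)) (target : Int) : Int :=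
  -- `parent = {child: p for p, child in parent_child_paris}`
  let parent := parent_child_paris.foldl
    (fun (d : PySem.Dict Int Int) pc => d.insert pc.2 pc.1) PySem.Dict.empty
  match pvChase parent (parent_child_paris.length + 1) target with
  | none => 0
  | some node => if node = target then -1 else node

-- ===== PRECONDITION & SPEC =====
-- parents of the members of S, as a finite set
def pvParentsOf (parent_child_paris : List (Int × Int)) (S : Finset Int) : Finset Int :=
  ((parent_child_paris.filter (fun pc => decide (pc.2 ∈ S))).map (·.1)).toFinset

def pvStepSet (parent_child_paris : List (Int × Int)) (S : Finset Int) : Finset Int :=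
  S ∪ pvParentsOf parent_child_paris S

-- all strict ancestors of n (the closure stabilises within length+1 rounds)
def pvAnc (parent_child_paris : List (Int × Int)) (n : Int) : Finset Int :=
  (pvStepSet parent_child_paris)^[parent_child_paris.length + 1] (pvParentsOf parent_child_paris {n})

-- Pre_ excludes exactly the inputs with a cycle among the ancestors reachable from target,
-- on which A's unbounded dfs recursion does not return (Python raises RecursionError).
def Pre_find_earliest_ancestor (parent_child_paris : List (Int × Int)) (target : Int) : Prop :=
  ∀ x ∈ insert target (pvAnc parent_child_paris target), x ∉ pvAnc parent_child_paris x

instance (parent_child_paris : List (Int × Int)) (target : Int) : Decidable (Pre_find_earliest_ancestor parent_child_paris target) := by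
  unfold Pre_find_earliest_ancestor; infer_instance

def pvWitness_find_earliest_ancestor : (List (Int × Int)) × Int := ([(1, 3), (2, 3), (3, 6), (5, 6)], 6)

def Spec_find_earliest_ancestor (parent_child_paris : List (Int × Int)) (target : Int) (out : Int) : Prop := out = find_earliest_ancestor_alt parent_child_paris target
instance (parent_child_paris : List (Int × Int)) (target : Int) (out : Int) : Decidable (Spec_find_earliest_ancestor parent_child_paris target out) := by unfold Spec_find_earliest_ancestor; infer_instance

-- ===== CLAIM (what is proved, stated in full; the proofs are below) =====
def Claim_equal_find_earliest_ancestor : Prop := ∀ (parent_child_paris : List (Int × Int)) (target : Int), Dom_find_earliest_ancestor parent_child_paris target → Pre_find_earliest_ancestor parent_child_paris target → Spec_find_earliest_ancestor parent_child_paris target (find_earliest_ancestor parent_child_paris target)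

-- ===== LEMMAS AND PROOFS =====

-- the ordered parent list of n, as A's dict stores it
def pvParentsList (pairs : List (Int × Int)) (n : Int) : List Int :=
  (pairs.filter (fun pc => pc.2 == n)).map (·.1)

theorem pvBuildStep_eq_modify :
    pvBuildStep = fun (d : PySem.Dict Int (List Int)) (pc : Int × Int) => d.modify pc.2 [] (· ++ [pc.1]) := by
  funext d pc
  by_cases h : d.contains pc.2 = false
  · simp only [pvBuildStep, if_pos h, PySem.Dict.modify,
      PySem.Dict.getD_of_not_contains d [] h, List.nil_append]
  · simp only [pvBuildStep, if_neg h]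

theorem pvBuild_getD (pairs : List (Int × Int)) (n : Int) :
    (pairs.foldl pvBuildStep PySem.Dict.empty).getD n [] = pvParentsList pairs n := by
  rw [pvBuildStep_eq_modify]
  have h : pairs.foldl (fun (d : PySem.Dict Int (List Int)) (pc : Int × Int) => d.modify pc.2 [] (· ++ [pc.1])) PySem.Dict.empty
      = (pairs.map Prod.swap).foldl (fun d p => d.modify p.1 [] (· ++ [p.2])) PySem.Dict.empty := by
    rw [List.foldl_map]
    rfl
  rw [h, PySem.Dict.getD_foldl_modify_append, PySem.Dict.getD_empty, List.nil_append,
    List.filter_map, List.map_map, pvParentsList]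
  rfl

theorem pvBuild_contains (pairs : List (Int × Int)) (n : Int) :
    (pairs.foldl pvBuildStep PySem.Dict.empty).contains n = true ↔ pvParentsList pairs n ≠ [] := by
  rw [pvBuildStep_eq_modify]
  have := PySem.Dict.keys_foldl_modify_key pairs (fun pc => pc.2) ([] : List Int)
      (fun _ pc => (· ++ [pc.1])) PySem.Dict.empty
  rw [PySem.Dict.contains_iff_mem_keys]
  rw [show (fun (d : PySem.Dict Int (List Int)) (pc : Int × Int) => d.modify pc.2 [] (· ++ [pc.1]))
      = (fun (d : PySem.Dict Int (List Int)) (pc : Int × Int) => d.modify ((fun pc : Int × Int => pc.2) pc) []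
        ((fun (_ : PySem.Dict Int (List Int)) (pc : Int × Int) => (· ++ [pc.1])) d pc)) from rfl, this]
  simp only [PySem.Set.mem_update, PySem.Dict.keys_empty]
  constructor
  · rintro (h | h)
    · simp at h
    · simp only [List.mem_map] at h
      obtain ⟨pc, hm, he⟩ := h
      simp only [pvParentsList, ne_eq, List.map_eq_nil_iff, List.filter_eq_nil_iff, not_forall]
      exact ⟨pc, hm, by simp [he]⟩
  · intro h
    simp only [pvParentsList, ne_eq, List.map_eq_nil_iff, List.filter_eq_nil_iff, not_forall] at h
    obtain ⟨pc, hm, he⟩ := h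
    right
    simp only [not_not] at he
    exact List.mem_map.2 ⟨pc, hm, by simpa using he⟩

theorem pvBuild_get? (pairs : List (Int × Int)) (n : Int) :
    (pairs.foldl pvBuildStep PySem.Dict.empty).get? n =
      if pvParentsList pairs n = [] then none else some (pvParentsList pairs n) := by
  by_cases h : pvParentsList pairs n = []
  · rw [if_pos h, PySem.Dict.get?_eq_none_iff_contains]
    by_contra hc
    have : (pairs.foldl pvBuildStep PySem.Dict.empty).contains n = true := by
      cases hcc : (pairs.foldl pvBuildStep PySem.Dict.empty).contains n
      · exact absurd hcc hc
      · rfl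
    exact (pvBuild_contains pairs n).1 this h
  · rw [if_neg h]
    have hc : (pairs.foldl pvBuildStep PySem.Dict.empty).contains n = true :=
      (pvBuild_contains pairs n).2 h
    cases hg : (pairs.foldl pvBuildStep PySem.Dict.empty).get? n with
    | none => rw [PySem.Dict.get?_eq_none_iff_contains] at hg; rw [hg] at hc; exact absurd hc (by simp)
    | some v =>
      have := PySem.Dict.getD_of_get?_eq_some (pairs.foldl pvBuildStep PySem.Dict.empty) ([] : List Int) hg
      rw [pvBuild_getD] at this
      rw [this]

-- B's child->parent dict looks up the LAST pair listing n as a child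
theorem pvParentDict_get? (pairs : List (Int × Int)) :
    ∀ (d : PySem.Dict Int Int) (n : Int),
      (pairs.foldl (fun (d : PySem.Dict Int Int) pc => d.insert pc.2 pc.1) d).get? n =
        ((pvParentsList pairs n).getLast?).or (d.get? n) := by
  induction pairs with
  | nil => intro d n; simp [pvParentsList]
  | cons pc rest ih =>
    intro d n
    simp only [List.foldl_cons, ih]
    simp only [pvParentsList, List.filter_cons]
    by_cases h : pc.2 = n
    · simp only [if_pos (show ((fun pc : Int × Int => pc.2 == n) pc = true) by simpa using h),
        List.map_cons]
      cases hg : ((rest.filter (fun pc => pc.2 == n)).map (·.1)).getLast? with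
      | some x =>
        rw [List.getLast?_cons, hg]
        rfl
      | none =>
        rw [List.getLast?_cons, hg]
        simp [PySem.Dict.get?_insert_self, h]
    · simp only [if_neg (show ¬ ((fun pc : Int × Int => pc.2 == n) pc = true) by simpa using h)]
      rw [PySem.Dict.get?_insert]
      rw [if_neg (by omega : ¬ n = pc.2)]

-- if the dfs loop returns, its value is the dfs of the last list element
theorem pvLoopA_last (dfs : Int → Option Int) :
    ∀ (ps : List Int) (acc : Option Int) (r : Int), ps ≠ [] →
      pvLoopA dfs ps acc = some r → ∃ last, ps.getLast? = some last ∧ dfs last = some r := by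
  intro ps
  induction ps with
  | nil => intro _ _ h; exact absurd rfl h
  | cons it rest ih =>
    intro acc r _ hl
    simp only [pvLoopA] at hl
    cases hd : dfs it with
    | none => rw [hd] at hl; simp at hl
    | some a =>
      rw [hd] at hl
      cases rest with
      | nil =>
        simp only [pvLoopA] at hl
        exact ⟨it, rfl, by rw [hd, ← hl]⟩
      | cons b bs =>
        obtain ⟨last, h1, h2⟩ := ih (some a) r (by simp) hl
        exact ⟨last, by rw [List.getLast?_cons]; rw [List.getLast?_cons] at h1 ⊢; simpa using h1, h2⟩

-- if every dfs call on the list returns, the loop returns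
theorem pvLoopA_ok (dfs : Int → Option Int) :
    ∀ (ps : List Int) (acc : Option Int), ps ≠ [] →
      (∀ it ∈ ps, ∃ a, dfs it = some a) → ∃ r, pvLoopA dfs ps acc = some r := by
  intro ps
  induction ps with
  | nil => intro _ h; exact absurd rfl h
  | cons it rest ih =>
    intro acc _ hall
    obtain ⟨a, ha⟩ := hall it (by simp)
    simp only [pvLoopA, ha]
    cases rest with
    | nil => exact ⟨a, rfl⟩
    | cons b bs =>
      exact ih (some a) (by simp) (fun x hx => hall x (by simp [hx]))

-- when A's dfs returns, B's chase on B's dict returns the same value with the same fuel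
theorem pvRel (pairs : List (Int × Int)) :
    ∀ (k : Nat) (n r : Int),
      pvDfsA (pairs.foldl pvBuildStep PySem.Dict.empty) k n = some r →
      pvChase (pairs.foldl (fun (d : PySem.Dict Int Int) pc => d.insert pc.2 pc.1) PySem.Dict.empty) k n = some r := by
  intro k
  induction k with
  | zero => intro n r h; simp [pvDfsA] at h
  | succ k ih =>
    intro n r h
    simp only [pvDfsA, pvBuild_get?] at h
    by_cases hq : pvParentsList pairs n = []
    · rw [if_pos hq] at h
      simp only [pvChase, pvParentDict_get?, hq, List.getLast?_nil, Option.none_or,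
        PySem.Dict.get?_empty]
      exact h
    · rw [if_neg hq] at h
      obtain ⟨last, h1, h2⟩ := pvLoopA_last _ _ _ _ hq h
      simp only [pvChase, pvParentDict_get?, h1, Option.some_or]
      exact ih last r h2

theorem pvMemParentsOf (pairs : List (Int × Int)) (S : Finset Int) (x : Int) :
    x ∈ pvParentsOf pairs S ↔ ∃ pc ∈ pairs, pc.1 = x ∧ pc.2 ∈ S := by
  simp only [pvParentsOf, List.mem_toFinset, List.mem_map, List.mem_filter, decide_eq_true_eq]
  constructor
  · rintro ⟨pc, ⟨h1, h2⟩, h3⟩; exact ⟨pc, h1, h3, h2⟩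
  · rintro ⟨pc, h1, h2, h3⟩; exact ⟨pc, ⟨h1, h3⟩, h2⟩

theorem pvParentsOf_mono (pairs : List (Int × Int)) {S T : Finset Int} (h : S ⊆ T) :
    pvParentsOf pairs S ⊆ pvParentsOf pairs T := by
  intro x hx
  rw [pvMemParentsOf] at hx ⊢
  obtain ⟨pc, h1, h2, h3⟩ := hx
  exact ⟨pc, h1, h2, h h3⟩

theorem pvSubset_step (pairs : List (Int × Int)) (S : Finset Int) : S ⊆ pvStepSet pairs S :=
  Finset.subset_union_left

theorem pvIterate_grow (pairs : List (Int × Int)) (S : Finset Int) (k : Nat) :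
    S ⊆ (pvStepSet pairs)^[k] S := by
  induction k with
  | zero => simp
  | succ k ih =>
    rw [Function.iterate_succ_apply']
    exact ih.trans (pvSubset_step pairs _)

theorem pvParentsOf_sub_P (pairs : List (Int × Int)) (S : Finset Int) :
    pvParentsOf pairs S ⊆ (pairs.map (·.1)).toFinset := by
  intro x hx
  rw [pvMemParentsOf] at hx
  obtain ⟨pc, h1, h2, _⟩ := hx
  rw [List.mem_toFinset, List.mem_map]
  exact ⟨pc, h1, h2⟩

theorem pvIterate_sub_P (pairs : List (Int × Int)) (S : Finset Int) (k : Nat)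
    (h : S ⊆ (pairs.map (·.1)).toFinset) :
    (pvStepSet pairs)^[k] S ⊆ (pairs.map (·.1)).toFinset := by
  induction k with
  | zero => simpa
  | succ k ih =>
    rw [Function.iterate_succ_apply']
    exact Finset.union_subset ih (pvParentsOf_sub_P pairs _)

theorem pvAnc_sub_P (pairs : List (Int × Int)) (n : Int) :
    pvAnc pairs n ⊆ (pairs.map (·.1)).toFinset :=
  pvIterate_sub_P pairs _ _ (pvParentsOf_sub_P pairs _)

theorem pvAnc_card_le (pairs : List (Int × Int)) (n : Int) :
    (pvAnc pairs n).card ≤ pairs.length := by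
  calc (pvAnc pairs n).card ≤ ((pairs.map (·.1)).toFinset).card :=
        Finset.card_le_card (pvAnc_sub_P pairs n)
    _ ≤ (pairs.map (·.1)).length := List.toFinset_card_le _
    _ = pairs.length := List.length_map _

-- the closure has stabilised after length+1 rounds
theorem pvAnc_fix (pairs : List (Int × Int)) (n : Int) :
    pvStepSet pairs (pvAnc pairs n) = pvAnc pairs n := by
  have key : ∀ k : Nat,
      pvStepSet pairs ((pvStepSet pairs)^[k] (pvParentsOf pairs {n})) = (pvStepSet pairs)^[k] (pvParentsOf pairs {n})
      ∨ k ≤ ((pvStepSet pairs)^[k] (pvParentsOf pairs {n})).card := by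
    intro k
    induction k with
    | zero => exact Or.inr (Nat.zero_le _)
    | succ k ih =>
      by_cases hf : pvStepSet pairs ((pvStepSet pairs)^[k] (pvParentsOf pairs {n})) = (pvStepSet pairs)^[k] (pvParentsOf pairs {n})
      · left
        rw [Function.iterate_succ_apply', hf, hf]
      · rcases ih with hfix | hcard
        · exact absurd hfix hf
        · right
          have hss : (pvStepSet pairs)^[k] (pvParentsOf pairs {n}) ⊂ (pvStepSet pairs)^[k+1] (pvParentsOf pairs {n}) := by
            rw [Function.iterate_succ_apply']
            exact HasSubset.Subset.ssubset_of_ne (pvSubset_step pairs _) (fun he => hf he.symm)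
          have := Finset.card_lt_card hss
          omega
  rcases key (pairs.length + 1) with h | h
  · exact h
  · have := pvAnc_card_le pairs n
    unfold pvAnc at this
    omega

theorem pvAnc_closed (pairs : List (Int × Int)) (n : Int) :
    pvParentsOf pairs (pvAnc pairs n) ⊆ pvAnc pairs n := by
  intro x hx
  rw [← pvAnc_fix pairs n]
  exact Finset.mem_union_right _ hx

theorem pvIterate_sub_closed (pairs : List (Int × Int)) {A S : Finset Int}
    (hA : pvParentsOf pairs A ⊆ A) (hS : S ⊆ A) (k : Nat) :
    (pvStepSet pairs)^[k] S ⊆ A := by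
  induction k with
  | zero => simpa
  | succ k ih =>
    rw [Function.iterate_succ_apply']
    exact Finset.union_subset ih ((pvParentsOf_mono pairs ih).trans hA)

theorem pvAnc_sub_of_mem (pairs : List (Int × Int)) {it n : Int} (h : it ∈ pvAnc pairs n) :
    pvAnc pairs it ⊆ pvAnc pairs n :=
  pvIterate_sub_closed pairs (pvAnc_closed pairs n)
    ((pvParentsOf_mono pairs (Finset.singleton_subset_iff.2 h)).trans (pvAnc_closed pairs n)) _

theorem pvInit_sub (pairs : List (Int × Int)) (n : Int) :
    pvParentsOf pairs {n} ⊆ pvAnc pairs n :=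
  pvIterate_grow pairs _ _

theorem pvParentsList_mem (pairs : List (Int × Int)) (n it : Int) :
    it ∈ pvParentsList pairs n ↔ it ∈ pvParentsOf pairs {n} := by
  rw [pvMemParentsOf]
  simp only [pvParentsList, List.mem_map, List.mem_filter, beq_iff_eq, Finset.mem_singleton]
  constructor
  · rintro ⟨pc, ⟨h1, h2⟩, h3⟩; exact ⟨pc, h1, h3, h2⟩
  · rintro ⟨pc, h1, h2, h3⟩; exact ⟨pc, ⟨h1, h3⟩, h2⟩

-- under Pre_, fuel larger than the ancestor count suffices for A's dfs to return
theorem pvAdq (pairs : List (Int × Int)) (target : Int)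
    (hpre : Pre_find_earliest_ancestor pairs target) :
    ∀ (k : Nat) (n : Int), (n = target ∨ n ∈ pvAnc pairs target) →
      (pvAnc pairs n).card < k →
      ∃ r, pvDfsA (pairs.foldl pvBuildStep PySem.Dict.empty) k n = some r := by
  intro k
  induction k with
  | zero => intro n _ hc; omega
  | succ k ih =>
    intro n hn hcard
    simp only [pvDfsA, pvBuild_get?]
    by_cases hq : pvParentsList pairs n = []
    · rw [if_pos hq]; exact ⟨n, rfl⟩
    · rw [if_neg hq]
      apply pvLoopA_ok _ _ _ hq
      intro it hit
      have hitP : it ∈ pvParentsOf pairs {n} := (pvParentsList_mem pairs n it).1 hit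
      have hitT : it ∈ pvAnc pairs target := by
        rcases hn with hn | hn
        · exact hn ▸ pvInit_sub pairs n hitP
        · exact pvAnc_closed pairs target
            (pvParentsOf_mono pairs (Finset.singleton_subset_iff.2 hn) hitP)
      have hitn : it ∈ pvAnc pairs n := pvInit_sub pairs n hitP
      have hni : it ∉ pvAnc pairs it := hpre it (Finset.mem_insert_of_mem hitT)
      have hss : pvAnc pairs it ⊂ pvAnc pairs n :=
        (Finset.ssubset_iff_of_subset (pvAnc_sub_of_mem pairs hitn)).2 ⟨it, hitn, hni⟩
      have := Finset.card_lt_card hss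
      exact ih it (Or.inr hitT) (by omega)

theorem pvAdequate (pairs : List (Int × Int)) (target : Int)
    (hpre : Pre_find_earliest_ancestor pairs target) :
    ∃ r, pvDfsA (pairs.foldl pvBuildStep PySem.Dict.empty) (pairs.length + 1) target = some r := by
  have := pvAnc_card_le pairs target
  exact pvAdq pairs target hpre (pairs.length + 1) target (Or.inl rfl) (by omega)

-- ===== VERDICT (by name: the statement is the Claim_ definition above) =====
theorem find_earliest_ancestor_spec : Claim_equal_find_earliest_ancestor := by
  intro pairs target _hdom hpre
  unfold Spec_find_earliest_ancestor
  obtain ⟨r, hr⟩ := pvAdequate pairs target hpre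
  have hb := pvRel pairs (pairs.length + 1) target r hr
  simp only [find_earliest_ancestor, find_earliest_ancestor_alt, hr, hb]
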